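-- pv_equiv track=rewrite | github.com/Textualize/rich | rich/_tools.py | iter_last
-- ===== SOURCE A (Python) =====
-- from typing import Iterable, List, Tuple, TypeVar
--
-- T = TypeVar("T")
--
-- def iter_last(values: Iterable[T]) -> Iterable[Tuple[bool, T]]:
--     """Iterate and generate a tuple with a flag for last value."""
--     iter_values = iter(values)
--     try:
--         previous_value = next(iter_values)
--     except StopIteration:
--         return
--     for value in iter_values:
--         yield False, previous_value
--         previous_value = value
--     yield True, previous_value
-- ===== SOURCE B (Python) =====
-- def iter_last(values):
--     """Iterate and generate a tuple with a flag for last value."""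
--     items = list(values)
--     n = len(items)
--     for i, v in enumerate(items):
--         yield i == n - 1, v
-- ===== Notes on version B (the rewrite author's own statement) =====
-- stated objective: simpler
-- what changed: B materializes the iterable and yields (i == n-1, v) by enumerated position instead of A's one-ahead lookahead buffer; B is eager rather than streaming (return value identical on all finite iterables).
import Mathlib
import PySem

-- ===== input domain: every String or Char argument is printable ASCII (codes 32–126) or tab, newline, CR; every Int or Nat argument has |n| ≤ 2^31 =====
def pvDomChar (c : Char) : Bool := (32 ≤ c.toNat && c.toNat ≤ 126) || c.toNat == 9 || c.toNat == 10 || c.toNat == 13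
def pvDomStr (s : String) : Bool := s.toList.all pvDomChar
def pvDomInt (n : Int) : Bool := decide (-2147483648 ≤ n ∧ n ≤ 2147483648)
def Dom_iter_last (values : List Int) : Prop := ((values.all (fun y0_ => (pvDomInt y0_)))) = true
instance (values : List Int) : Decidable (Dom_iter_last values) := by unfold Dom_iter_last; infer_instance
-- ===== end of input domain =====

-- B replaces A's one-ahead lookahead buffer with an enumerated index-vs-length comparison;
-- equivalence is about the returned sequence (A is a lazy generator, B is eager).

-- ===== PORT A =====
-- A: take the first element as `previous_value`, then for each further value yield
-- (False, previous) and shift; finally yield (True, previous).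
def iterLastAuxA (prev : Int) : List Int → List (Bool × Int)
  | [] => [(true, prev)]
  | v :: rest => (false, prev) :: iterLastAuxA v rest

def iter_last (values : List Int) : List (Bool × Int) :=
  match values with
  | [] => []
  | v :: rest => iterLastAuxA v rest

-- ===== PORT B =====
-- B: materialize, then (i == n - 1, v) for each enumerated position.
def iter_last_alt (values : List Int) : List (Bool × Int) :=
  let n : Int := values.length
  (PySem.List.enumerate values 0).map (fun p => (decide (p.1 = n - 1), p.2))

-- ===== PRECONDITION & SPEC =====
def Spec_iter_last (values : List Int) (out : List (Bool × Int)) : Prop := out = iter_last_alt values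
instance (values : List Int) (out : List (Bool × Int)) : Decidable (Spec_iter_last values out) := by unfold Spec_iter_last; infer_instance

-- ===== CLAIM (what is proved, stated in full; the proofs are below) =====
def Claim_equal_iter_last : Prop := ∀ (values : List Int), Dom_iter_last values → Spec_iter_last values (iter_last values)

-- ===== LEMMAS AND PROOFS =====
theorem iterLastAuxA_enum (xs : List Int) : ∀ (prev : Int) (s : Int),
    iterLastAuxA prev xs
      = (PySem.List.enumerate (prev :: xs) s).map (fun p => (decide (p.1 = s + xs.length), p.2)) := by
  induction xs with
  | nil =>
    intro prev s
    simp [iterLastAuxA, PySem.List.enumerate_cons, PySem.List.enumerate_nil]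
  | cons v rest ih =>
    intro prev s
    have h := ih v (s + 1)
    simp only [iterLastAuxA, PySem.List.enumerate_cons, List.map_cons, h]
    refine congrArg₂ List.cons ?_ (congrArg₂ List.cons ?_ ?_)
    · refine congrArg₂ Prod.mk ?_ rfl
      symm
      simp only [List.length_cons, decide_eq_false_iff_not]
      push_cast; omega
    · refine congrArg₂ Prod.mk ?_ rfl
      simp only [decide_eq_decide, List.length_cons]
      push_cast; omega
    · apply List.map_congr_left
      intro p _
      refine congrArg₂ Prod.mk ?_ rfl
      simp only [decide_eq_decide, List.length_cons]
      push_cast; omega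

-- ===== VERDICT (by name: the statement is the Claim_ definition above) =====
theorem iter_last_spec : Claim_equal_iter_last := by
  intro values _
  unfold Spec_iter_last
  cases values with
  | nil => simp [iter_last, iter_last_alt, PySem.List.enumerate_nil]
  | cons v rest =>
    show iterLastAuxA v rest = _
    simp only [iter_last_alt]
    rw [iterLastAuxA_enum rest v 0]
    apply List.map_congr_left
    intro p _
    refine congrArg₂ Prod.mk ?_ rfl
    simp only [decide_eq_decide, List.length_cons]
    push_cast; omega
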